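-- pv_equiv track=rewrite | github.com/carlegbert/advent-of-code | aoc24/solutions/p12.py | count_continuous_ranges
-- ===== SOURCE A (Python) =====
-- def count_continuous_ranges(items: list[int]) -> int:
--     count = 0
--     items = sorted(items)
--     prev = None
--     while items:
--         item = items.pop()
--         if item + 1 != prev:
--             count += 1
--         prev = item
--
--     return count
-- ===== SOURCE B (Python) =====
-- def count_continuous_ranges(items: list[int]) -> int:
--     s = set(items)
--     tops = sum(1 for v in s if v + 1 not in s)
--     return (len(items) - len(s)) + tops
-- ===== Notes on version B (the rewrite author's own statement) =====
-- stated objective: simpler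
-- what changed: Replaces the sort-then-pop scan with a closed-form count over a hash set: number of run-tops (v in set with v+1 not in set) plus one per duplicate copy (len(items) - len(set)).
import Mathlib
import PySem

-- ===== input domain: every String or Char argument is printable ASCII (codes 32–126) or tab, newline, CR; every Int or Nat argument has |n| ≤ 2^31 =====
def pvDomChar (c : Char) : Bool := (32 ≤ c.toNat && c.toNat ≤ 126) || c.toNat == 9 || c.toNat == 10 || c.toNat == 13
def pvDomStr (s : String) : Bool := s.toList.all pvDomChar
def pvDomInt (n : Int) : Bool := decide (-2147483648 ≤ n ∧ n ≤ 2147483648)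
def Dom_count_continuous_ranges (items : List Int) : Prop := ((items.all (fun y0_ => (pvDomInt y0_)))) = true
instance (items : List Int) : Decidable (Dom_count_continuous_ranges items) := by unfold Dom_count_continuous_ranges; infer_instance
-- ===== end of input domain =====

-- B replaces A's sort-and-pop scan by a set-based closed form (run tops + duplicate copies); return value only, A does not mutate the caller's list.

-- ===== PORT A =====
-- while items: item = items.pop(); if item + 1 != prev: count += 1; prev = item
def pvA_loop (items : List Int) (prev : Option Int) (count : Int) : Int :=
  match h : items.getLast? with
  | none => count
  | some item =>
      pvA_loop items.dropLast (some item)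
        (if some (item + 1) ≠ prev then count + 1 else count)
termination_by items.length
decreasing_by
  cases items with
  | nil => simp at h
  | cons a t => simp [List.length_dropLast]

def count_continuous_ranges (items : List Int) : Int :=
  pvA_loop (PySem.List.sorted items (fun x => x) false) none 0

-- ===== PORT B =====
def count_continuous_ranges_alt (items : List Int) : Int :=
  let s : PySem.Set Int := PySem.Set.ofList items
  let tops : Int := (s.filter (fun v => !(PySem.Set.contains s (v + 1)))).length
  ((items.length : Int) - PySem.Set.len s) + tops

-- ===== PRECONDITION & SPEC =====
def Spec_count_continuous_ranges (items : List Int) (out : Int) : Prop := out = count_continuous_ranges_alt items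
instance (items : List Int) (out : Int) : Decidable (Spec_count_continuous_ranges items out) := by unfold Spec_count_continuous_ranges; infer_instance

-- ===== CLAIM (what is proved, stated in full; the proofs are below) =====
def Claim_equal_count_continuous_ranges : Prop := ∀ (items : List Int), Dom_count_continuous_ranges items → Spec_count_continuous_ranges items (count_continuous_ranges items)

-- ===== LEMMAS AND PROOFS =====

-- pvCnt r prev: the count A's loop accumulates, as a head-first recursion over the popped (descending) order r
def pvCnt : List Int → Option Int → Int
  | [], _ => 0
  | x :: t, prev => (if some (x + 1) ≠ prev then 1 else 0) + pvCnt t (some x)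

theorem pvA_loop_nil (prev : Option Int) (c : Int) : pvA_loop [] prev c = c := by
  unfold pvA_loop; rfl

theorem pvA_loop_concat (xs : List Int) (a : Int) (prev : Option Int) (c : Int) :
    pvA_loop (xs ++ [a]) prev c
      = pvA_loop xs (some a) (if some (a + 1) ≠ prev then c + 1 else c) := by
  conv_lhs => rw [pvA_loop.eq_def]
  split
  · rename_i h; simp at h
  · rename_i item h
    rw [List.getLast?_concat] at h
    cases h
    rw [List.dropLast_concat]

theorem pvA_loop_eq_cnt (l : List Int) : ∀ (prev : Option Int) (c : Int),
    pvA_loop l prev c = c + pvCnt l.reverse prev := by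
  induction l using List.reverseRecOn with
  | nil => intro prev c; rw [pvA_loop_nil]; simp [pvCnt]
  | append_singleton xs a ih =>
      intro prev c
      rw [pvA_loop_concat, ih, List.reverse_append]
      simp only [List.reverse_cons, List.reverse_nil, List.nil_append, List.singleton_append, pvCnt]
      split_ifs <;> ring

-- exactly one element of a nodup list satisfies c; excluding it drops the filter length by one
theorem filter_excl_one {m : List Int} (hm : m.Nodup) {x : Int} (hx : x ∈ m)
    (q c : Int → Bool) (hqx : q x = true) (hc : ∀ v ∈ m, c v = true ↔ v = x) :
    ((m.filter q).length : Int) = ((m.filter (fun v => q v && !(c v))).length : Int) + 1 := by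
  have h1 : m.filter (fun v => q v && c v) = m.filter (fun v => v == x) := by
    apply List.filter_congr
    intro v hv
    by_cases hvx : v = x
    · subst hvx; simp [hqx, (hc v hv).mpr rfl]
    · have hcv : c v = false := by
        cases hcv : c v
        · rfl
        · exact absurd ((hc v hv).mp hcv) hvx
      simp [hcv, hvx]
  have h2 : (m.filter (fun v => v == x)).length = 1 := by
    rw [← List.countP_eq_length_filter]
    have := List.count_eq_one_of_mem hm hx
    simpa [List.count] using this
  have h3 := List.length_eq_length_filter_add (l := m.filter q) c
  rw [List.filter_filter, List.filter_filter] at h3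
  rw [List.filter_congr (fun v _ => Bool.and_comm (c v) (q v)), h1, h2] at h3
  rw [List.filter_congr (l := m) (fun v (_ : v ∈ m) => Bool.and_comm (!(c v)) (q v))] at h3
  omega

-- main invariant: on a descending list r, A's loop count equals (duplicate copies) + (run tops)
theorem cnt_desc (r : List Int) (hr : List.Pairwise (fun a b => b ≤ a) r) :
    (pvCnt r none = (r.length : Int) - r.dedup.length
        + ((r.dedup.filter (fun v => !(decide ((v + 1) ∈ r)))).length : Int))
    ∧ ∀ p : Int, (∀ x ∈ r, x ≤ p) →
        pvCnt r (some p) = (r.length : Int) - r.dedup.length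
          + ((r.dedup.filter (fun v => !(decide ((v + 1) ∈ r)) && !(decide (v + 1 = p)))).length : Int) := by
  induction r with
  | nil => constructor <;> simp [pvCnt]
  | cons x t ih =>
      have ht : ∀ y ∈ t, y ≤ x := by
        intro y hy; exact (List.pairwise_cons.mp hr).1 y hy
      have htp : List.Pairwise (fun a b => b ≤ a) t := (List.pairwise_cons.mp hr).2
      obtain ⟨ih1, ih2⟩ := ih htp
      have hx1t : (x + 1) ∉ t := fun h => absurd (ht _ h) (by omega)
      have hq : ∀ v ∈ t.dedup, (!(decide ((v + 1) ∈ x :: t)))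
          = (!(decide ((v + 1) ∈ t)) && !(decide (v + 1 = x))) := by
        intro v _; by_cases h1 : (v + 1) ∈ t <;> by_cases h2 : v + 1 = x <;>
          simp [List.mem_cons, h1, h2]
      constructor
      · -- prev = none
        have hstep : pvCnt (x :: t) none = 1 + pvCnt t (some x) := by simp [pvCnt]
        rw [hstep, ih2 x ht]
        by_cases hxt : x ∈ t
        · rw [List.dedup_cons_of_mem hxt, List.filter_congr hq]
          simp only [List.length_cons]
          push_cast; ring
        · rw [List.dedup_cons_of_notMem hxt]
          have hx : (!(decide ((x + 1) ∈ x :: t))) = true := by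
            simp only [Bool.not_eq_true', decide_eq_false_iff_not, List.mem_cons, not_or]
            exact ⟨by omega, hx1t⟩
          rw [List.filter_cons, if_pos hx, List.filter_congr hq]
          simp only [List.length_cons]
          push_cast; ring
      · -- prev = some p, with x ≤ p
        intro p hp
        have hxp : x ≤ p := hp x List.mem_cons_self
        have hstep : pvCnt (x :: t) (some p)
            = (if x + 1 ≠ p then 1 else 0) + pvCnt t (some x) := by simp [pvCnt]
        rw [hstep, ih2 x ht]
        have hq2 : ∀ v ∈ t.dedup, (!(decide ((v + 1) ∈ x :: t)) && !(decide (v + 1 = p)))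
            = ((!(decide ((v + 1) ∈ t)) && !(decide (v + 1 = x))) && !(decide (v + 1 = p))) := by
          intro v hv; rw [hq v hv]
        by_cases hxt : x ∈ t
        · rw [List.dedup_cons_of_mem hxt, List.filter_congr hq2]
          by_cases hpx1 : p = x + 1
          · subst hpx1
            have hqx : (!(decide ((x + 1) ∈ t)) && !(decide (x + 1 = x))) = true := by
              simp only [Bool.and_eq_true, Bool.not_eq_true', decide_eq_false_iff_not]
              exact ⟨hx1t, by omega⟩
            have hkey := filter_excl_one (List.nodup_dedup t) (List.mem_dedup.mpr hxt)
              (fun v => !(decide ((v + 1) ∈ t)) && !(decide (v + 1 = x)))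
              (fun v => decide (v + 1 = x + 1)) hqx
              (by intro v _; simp only [decide_eq_true_eq]; omega)
            simp only [] at hkey
            rw [if_neg (show ¬ (x + 1 ≠ x + 1) from by omega)]
            simp only [List.length_cons]
            push_cast
            omega
          · have hcongr : ∀ v ∈ t.dedup,
                ((!(decide ((v + 1) ∈ t)) && !(decide (v + 1 = x))) && !(decide (v + 1 = p)))
                = (!(decide ((v + 1) ∈ t)) && !(decide (v + 1 = x))) := by
              intro v hv
              have hvx : v ≤ x := ht v (List.mem_dedup.mp hv)
              by_cases hvp : v + 1 = p
              · have hdx : v + 1 = x := by omega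
                simp [hdx]
              · simp [hvp]
            rw [List.filter_congr hcongr]
            have hne : x + 1 ≠ p := by omega
            rw [if_pos hne]
            simp only [List.length_cons]
            push_cast; ring
        · rw [List.dedup_cons_of_notMem hxt]
          have hxmem : (x + 1) ∉ x :: t := by
            simp only [List.mem_cons, not_or]
            exact ⟨by omega, hx1t⟩
          by_cases hpx1 : p = x + 1
          · subst hpx1
            have hhead : ((!(decide ((x + 1) ∈ x :: t))) && !(decide (x + 1 = x + 1))) = false := by
              simp
            rw [List.filter_cons, if_neg (show ¬ ((((!(decide ((x + 1) ∈ x :: t))) && !(decide (x + 1 = x + 1)))) = true) from by simp)]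
            have hcongr : ∀ v ∈ t.dedup,
                (!(decide ((v + 1) ∈ x :: t)) && !(decide (v + 1 = x + 1)))
                = (!(decide ((v + 1) ∈ t)) && !(decide (v + 1 = x))) := by
              intro v hv
              have hvt : v ∈ t := List.mem_dedup.mp hv
              have hvnex : ¬ (v + 1 = x + 1) := by
                intro h
                have : v = x := by omega
                exact hxt (this ▸ hvt)
              rw [hq v hv]
              simp [hvnex]
            rw [List.filter_congr hcongr]
            rw [if_neg (show ¬ (x + 1 ≠ x + 1) from by omega)]
            simp only [List.length_cons]
            push_cast; ring
          · have hhead : ((!(decide ((x + 1) ∈ x :: t))) && !(decide (x + 1 = p))) = true := by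
              simp only [Bool.and_eq_true, Bool.not_eq_true', decide_eq_false_iff_not]
              exact ⟨hxmem, by omega⟩
            rw [List.filter_cons, if_pos hhead, List.filter_congr hq2]
            have hcongr2 : ∀ v ∈ t.dedup,
                ((!(decide ((v + 1) ∈ t)) && !(decide (v + 1 = x))) && !(decide (v + 1 = p)))
                = (!(decide ((v + 1) ∈ t)) && !(decide (v + 1 = x))) := by
              intro v hv
              have hvx : v ≤ x := ht v (List.mem_dedup.mp hv)
              by_cases hvp : v + 1 = p
              · have hdx : v + 1 = x := by omega
                simp [hdx]
              · simp [hvp]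
            rw [List.filter_congr hcongr2]
            have hne : x + 1 ≠ p := by omega
            rw [if_pos hne]
            simp only [List.length_cons]
            push_cast; ring

-- ===== VERDICT (by name: the statement is the Claim_ definition above) =====
theorem count_continuous_ranges_spec : Claim_equal_count_continuous_ranges := by
  intro items _
  unfold Spec_count_continuous_ranges count_continuous_ranges count_continuous_ranges_alt
  set l := PySem.List.sorted items (fun x => x) false with hl
  have hperm : l.reverse.Perm items :=
    (l.reverse_perm).trans (by rw [hl]; exact PySem.List.sorted_perm items (fun x => x) false)
  have hr : List.Pairwise (fun a b => b ≤ a) l.reverse := by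
    rw [List.pairwise_reverse]
    rw [hl]; exact PySem.List.sorted_pairwise items (fun x => x)
  rw [pvA_loop_eq_cnt, (cnt_desc l.reverse hr).1]
  have hmem : ∀ y : Int, y ∈ l.reverse ↔ y ∈ items := fun y => hperm.mem_iff
  have hsperm : l.reverse.dedup.Perm (PySem.Set.ofList items) := by
    rw [List.perm_ext_iff_of_nodup (List.nodup_dedup l.reverse) (PySem.Set.nodup_ofList items)]
    intro y
    rw [List.mem_dedup, hmem, PySem.Set.mem_ofList]
  have hfcongr : (PySem.Set.ofList items).filter (fun v => !(decide ((v + 1) ∈ l.reverse)))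
      = (PySem.Set.ofList items).filter (fun v => !(PySem.Set.contains (PySem.Set.ofList items) (v + 1))) := by
    apply List.filter_congr
    intro v _
    have hbool : PySem.Set.contains (PySem.Set.ofList items) (v + 1) = decide ((v + 1) ∈ l.reverse) := by
      by_cases h : (v + 1) ∈ items
      · have h1 : PySem.Set.contains (PySem.Set.ofList items) (v + 1) = true :=
          (PySem.Set.contains_iff _ _).mpr ((PySem.Set.mem_ofList _ _).mpr h)
        have h2 : decide ((v + 1) ∈ l.reverse) = true := decide_eq_true ((hmem _).mpr h)
        rw [h1, h2]
      · have h1 : PySem.Set.contains (PySem.Set.ofList items) (v + 1) = false := by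
          cases hc : PySem.Set.contains (PySem.Set.ofList items) (v + 1)
          · rfl
          · exact absurd ((PySem.Set.mem_ofList _ _).mp ((PySem.Set.contains_iff _ _).mp hc)) h
        have h2 : decide ((v + 1) ∈ l.reverse) = false :=
          decide_eq_false (fun hh => h ((hmem _).mp hh))
        rw [h1, h2]
    rw [hbool]
  have hflen := (hsperm.filter (fun v => !(decide ((v + 1) ∈ l.reverse)))).length_eq
  rw [hfcongr] at hflen
  simp only [PySem.Set.len]
  rw [hperm.length_eq, hsperm.length_eq, hflen]
  ring
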